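-- pv_equiv track=rewrite | github.com/wpdavenport/brew_assistant | tools/render_recipe_html.py | subsection_bullets
-- ===== SOURCE A (Python) =====
-- def subsection_bullets(lines: list[str], allowed_titles: set[str]) -> list[str]:
--     current = ""
--     bullets: list[str] = []
--     for raw in lines:
--         stripped = raw.strip()
--         if stripped.startswith("### "):
--             current = stripped[4:].strip()
--             continue
--         if stripped.startswith("- ") and current in allowed_titles:
--             bullets.append(stripped[2:].strip())
--     return bullets
-- ===== SOURCE B (Python) =====
-- def subsection_bullets(lines: list[str], allowed_titles: set[str]) -> list[str]:
--     # Pass 1: split into ordered sections (title, bullets), starting with an implicit ""-titled section.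
--     sections: list[tuple[str, list[str]]] = []
--     title = ""
--     items: list[str] = []
--     for raw in lines:
--         s = raw.strip()
--         if s.startswith("### "):
--             sections.append((title, items))
--             title = s[4:].strip()
--             items = []
--         elif s.startswith("- "):
--             items.append(s[2:].strip())
--     sections.append((title, items))
--     # Pass 2: keep bullets of allowed sections, in order.
--     out: list[str] = []
--     for t, bs in sections:
--         if t in allowed_titles:
--             out.extend(bs)
--     return out
-- ===== Notes on version B (the rewrite author's own statement) =====
-- stated objective: alternative
-- what changed: B replaces A's single interleaved pass (mutable current-title state deciding each bullet on the spot) by a two-phase decomposition: first build an ordered list of (title, bullets) sections, then concatenate the bullets of sections whose title is allowed.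
import Mathlib
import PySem

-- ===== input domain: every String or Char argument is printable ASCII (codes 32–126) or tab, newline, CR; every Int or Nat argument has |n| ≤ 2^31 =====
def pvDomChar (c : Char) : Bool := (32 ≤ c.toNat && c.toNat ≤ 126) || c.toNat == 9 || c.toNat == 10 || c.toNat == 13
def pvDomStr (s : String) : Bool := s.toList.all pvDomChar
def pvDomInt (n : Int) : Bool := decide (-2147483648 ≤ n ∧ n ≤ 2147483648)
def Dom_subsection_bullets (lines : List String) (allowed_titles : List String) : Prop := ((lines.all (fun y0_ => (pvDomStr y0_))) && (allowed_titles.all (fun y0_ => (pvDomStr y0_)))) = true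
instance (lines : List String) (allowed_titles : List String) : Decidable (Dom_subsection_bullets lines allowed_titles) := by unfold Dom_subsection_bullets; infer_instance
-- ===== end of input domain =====

-- B replaces A's single interleaved pass by a two-phase decomposition (collect ordered (title, bullets) sections, then flatten the allowed ones); same cost, no speed claim.


-- ===== PORT A =====
-- A: one interleaved pass; 'current' title decides each bullet as it is met.
def subsection_bullets (lines : List String) (allowed_titles : List String) : List String :=
  (lines.foldl (fun (st : String × List String) raw =>
    let stripped := PySem.Str.strip raw
    if PySem.Str.startswith stripped "### " then
      (PySem.Str.strip (PySem.Str.slice stripped (some 4) none), st.2)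
    else if PySem.Str.startswith stripped "- " && allowed_titles.contains st.1 then
      (st.1, st.2 ++ [PySem.Str.strip (PySem.Str.slice stripped (some 2) none)])
    else st) ("", [])).2

-- ===== PORT B =====
-- B: two phases — build ordered (title, bullets) sections, then flatten the allowed ones.
def sbSections (lines : List String) : List (String × List String) :=
  let st := lines.foldl
    (fun (st : List (String × List String) × String × List String) raw =>
      let s := PySem.Str.strip raw
      if PySem.Str.startswith s "### " then
        (st.1 ++ [(st.2.1, st.2.2)], PySem.Str.strip (PySem.Str.slice s (some 4) none), [])
      else if PySem.Str.startswith s "- " then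
        (st.1, st.2.1, st.2.2 ++ [PySem.Str.strip (PySem.Str.slice s (some 2) none)])
      else st)
    ([], "", [])
  st.1 ++ [(st.2.1, st.2.2)]

def subsection_bullets_alt (lines : List String) (allowed_titles : List String) : List String :=
  (sbSections lines).foldl
    (fun out p => if allowed_titles.contains p.1 then out ++ p.2 else out) []

-- ===== PRECONDITION & SPEC =====
def Spec_subsection_bullets (lines : List String) (allowed_titles : List String) (out : List String) : Prop := out = subsection_bullets_alt lines allowed_titles
instance (lines : List String) (allowed_titles : List String) (out : List String) : Decidable (Spec_subsection_bullets lines allowed_titles out) := by unfold Spec_subsection_bullets; infer_instance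

-- ===== CLAIM (what is proved, stated in full; the proofs are below) =====
def Claim_equal_subsection_bullets : Prop := ∀ (lines : List String) (allowed_titles : List String), Dom_subsection_bullets lines allowed_titles → Spec_subsection_bullets lines allowed_titles (subsection_bullets lines allowed_titles)

-- ===== LEMMAS AND PROOFS =====

-- spec-side recursion: the bullets A still emits from 'lines' given current title 'cur'
def sbGo (allowed_titles : List String) : List String → String → List String
  | [], _ => []
  | raw :: rest, cur =>
    let s := PySem.Str.strip raw
    if PySem.Str.startswith s "### " then
      sbGo allowed_titles rest (PySem.Str.strip (PySem.Str.slice s (some 4) none))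
    else if PySem.Str.startswith s "- " && allowed_titles.contains cur then
      PySem.Str.strip (PySem.Str.slice s (some 2) none) :: sbGo allowed_titles rest cur
    else sbGo allowed_titles rest cur

theorem sbA_eq (allowed_titles : List String) :
    ∀ (lines : List String) (cur : String) (acc : List String),
      (lines.foldl (fun (st : String × List String) raw =>
        let stripped := PySem.Str.strip raw
        if PySem.Str.startswith stripped "### " then
          (PySem.Str.strip (PySem.Str.slice stripped (some 4) none), st.2)
        else if PySem.Str.startswith stripped "- " && allowed_titles.contains st.1 then
          (st.1, st.2 ++ [PySem.Str.strip (PySem.Str.slice stripped (some 2) none)])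
        else st) (cur, acc)).2 = acc ++ sbGo allowed_titles lines cur := by
  intro lines
  induction lines with
  | nil => intro cur acc; simp [sbGo]
  | cons raw rest ih =>
      intro cur acc
      simp only [List.foldl_cons, sbGo]
      by_cases h1 : PySem.Str.startswith (PySem.Str.strip raw) "### " = true
      · simp only [h1, if_true]
        rw [ih]
      · by_cases h2 : (PySem.Str.startswith (PySem.Str.strip raw) "- " && allowed_titles.contains cur) = true
        · simp only [h1, h2, Bool.false_eq_true, if_false, if_true]
          rw [ih]
          simp
        · simp only [h1, h2, Bool.false_eq_true, if_false]
          rw [ih]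

-- recursive form of B's second (flushing) pass
def sbFlushR (allowed_titles : List String) : List (String × List String) → List String
  | [] => []
  | p :: rest =>
      (if allowed_titles.contains p.1 then p.2 else []) ++ sbFlushR allowed_titles rest

theorem foldl_flush_eq (allowed_titles : List String) :
    ∀ (secs : List (String × List String)) (out : List String),
      secs.foldl (fun out p => if allowed_titles.contains p.1 then out ++ p.2 else out) out
        = out ++ sbFlushR allowed_titles secs := by
  intro secs
  induction secs with
  | nil => intro out; simp [sbFlushR]
  | cons p rest ih =>
      intro out
      rw [List.foldl_cons, ih, sbFlushR]
      by_cases h : p.1 ∈ allowed_titles <;> simp [h]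

theorem sbFlushR_append (allowed_titles : List String)
    (l1 l2 : List (String × List String)) :
    sbFlushR allowed_titles (l1 ++ l2)
      = sbFlushR allowed_titles l1 ++ sbFlushR allowed_titles l2 := by
  induction l1 with
  | nil => simp [sbFlushR]
  | cons p rest ih => simp [sbFlushR, ih]

theorem sbB_eq (allowed_titles : List String) :
    ∀ (lines : List String) (secs : List (String × List String)) (title : String)
      (items : List String),
      (let st := lines.foldl
        (fun (st : List (String × List String) × String × List String) raw =>
          let s := PySem.Str.strip raw
          if PySem.Str.startswith s "### " then
            (st.1 ++ [(st.2.1, st.2.2)], PySem.Str.strip (PySem.Str.slice s (some 4) none), [])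
          else if PySem.Str.startswith s "- " then
            (st.1, st.2.1, st.2.2 ++ [PySem.Str.strip (PySem.Str.slice s (some 2) none)])
          else st)
        (secs, title, items)
       sbFlushR allowed_titles (st.1 ++ [(st.2.1, st.2.2)]))
      = sbFlushR allowed_titles secs
        ++ (if allowed_titles.contains title then items else [])
        ++ sbGo allowed_titles lines title := by
  intro lines
  induction lines with
  | nil =>
      intro secs title items
      by_cases h3 : title ∈ allowed_titles <;>
        simp [sbGo, sbFlushR_append, sbFlushR, h3]
  | cons raw rest ih =>
      intro secs title items
      simp only [List.foldl_cons, sbGo]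
      by_cases h1 : PySem.Str.startswith (PySem.Str.strip raw) "### " = true
      · simp only [h1, if_true]
        rw [ih]
        by_cases h3 : title ∈ allowed_titles <;>
          simp [sbFlushR_append, sbFlushR, h3]
      · by_cases h2 : PySem.Str.startswith (PySem.Str.strip raw) "- " = true
        · simp only [h1, h2, Bool.false_eq_true, if_false, if_true, Bool.true_and]
          rw [ih]
          by_cases h3 : title ∈ allowed_titles <;> simp [h3]
        · simp only [h1, h2, Bool.false_eq_true, if_false, Bool.false_and]
          rw [ih]

theorem sbA_top (lines : List String) (allowed_titles : List String) :
    subsection_bullets lines allowed_titles = sbGo allowed_titles lines "" := by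
  exact sbA_eq allowed_titles lines "" []

theorem sbB_top (lines : List String) (allowed_titles : List String) :
    subsection_bullets_alt lines allowed_titles = sbGo allowed_titles lines "" := by
  have h := sbB_eq allowed_titles lines [] "" []
  have h2 : sbFlushR allowed_titles []
      ++ (if allowed_titles.contains "" then ([] : List String) else [])
      ++ sbGo allowed_titles lines "" = sbGo allowed_titles lines "" := by
    by_cases hc : "" ∈ allowed_titles <;> simp [sbFlushR, hc]
  have h0 : subsection_bullets_alt lines allowed_titles
      = List.foldl (fun out p => if allowed_titles.contains p.1 then out ++ p.2 else out)
          [] (sbSections lines) := rfl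
  rw [h0, foldl_flush_eq, List.nil_append]
  exact h.trans h2

-- ===== VERDICT (by name: the statement is the Claim_ definition above) =====
theorem subsection_bullets_spec : Claim_equal_subsection_bullets := by
  intro lines allowed_titles _
  unfold Spec_subsection_bullets
  rw [sbA_top, sbB_top]
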